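-- pv_equiv track=rewrite | github.com/nadeemakhter0602/Advent-of-Code-2022 | Day 24/solution_p2.py | find_blizzard_positions
-- ===== SOURCE A (Python) =====
-- def find_blizzard_positions(blizzard_positions, row_end, col_end):
--     blizzard_positions_in_time = dict()
--     for time in range(0, col_end * row_end * 3):
--         occupied = set()
--         for i in range(len(blizzard_positions)):
--             row, col, direction = blizzard_positions[i]
--             if direction == '>':
--                 col += 1
--                 if col > col_end:
--                     col = 1
--             elif direction == '<':
--                 col -= 1
--                 if col < 1:
--                     col = col_end
--             elif direction == '^':
--                 row -= 1
--                 if row < 1: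
--                     row = row_end
--             elif direction == 'v':
--                 row += 1
--                 if row > row_end:
--                     row = 1
--             blizzard_positions[i] = (row, col, direction)
--             occupied.add((row, col))
--         blizzard_positions_in_time[time] = occupied
--     return blizzard_positions_in_time
-- ===== SOURCE B (Python) =====
-- def find_blizzard_positions(blizzard_positions, row_end, col_end):
--     total = col_end * row_end * 3
--     occupied_at = [set() for _ in range(total)]
--     for i in range(len(blizzard_positions)):
--         row, col, direction = blizzard_positions[i]
--         if direction == '>':
--             for t in range(total):
--                 col = 1 if col + 1 > col_end else col + 1
--                 occupied_at[t].add((row, col))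
--         elif direction == '<':
--             for t in range(total):
--                 col = col_end if col - 1 < 1 else col - 1
--                 occupied_at[t].add((row, col))
--         elif direction == '^':
--             for t in range(total):
--                 row = row_end if row - 1 < 1 else row - 1
--                 occupied_at[t].add((row, col))
--         elif direction == 'v':
--             for t in range(total):
--                 row = 1 if row + 1 > row_end else row + 1
--                 occupied_at[t].add((row, col))
--         else:
--             for t in range(total):
--                 occupied_at[t].add((row, col))
--         blizzard_positions[i] = (row, col, direction)
--     return dict(enumerate(occupied_at))
-- ===== Notes on version B (the rewrite author's own statement) =====
-- stated objective: alternative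
-- what changed: Loop interchange: instead of re-scanning and rewriting the whole blizzard list at every tick, B iterates once per blizzard, dispatches on its direction a single time, and advances only that blizzard's moving coordinate through all ticks, filling per-tick occupied sets.
import Mathlib
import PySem

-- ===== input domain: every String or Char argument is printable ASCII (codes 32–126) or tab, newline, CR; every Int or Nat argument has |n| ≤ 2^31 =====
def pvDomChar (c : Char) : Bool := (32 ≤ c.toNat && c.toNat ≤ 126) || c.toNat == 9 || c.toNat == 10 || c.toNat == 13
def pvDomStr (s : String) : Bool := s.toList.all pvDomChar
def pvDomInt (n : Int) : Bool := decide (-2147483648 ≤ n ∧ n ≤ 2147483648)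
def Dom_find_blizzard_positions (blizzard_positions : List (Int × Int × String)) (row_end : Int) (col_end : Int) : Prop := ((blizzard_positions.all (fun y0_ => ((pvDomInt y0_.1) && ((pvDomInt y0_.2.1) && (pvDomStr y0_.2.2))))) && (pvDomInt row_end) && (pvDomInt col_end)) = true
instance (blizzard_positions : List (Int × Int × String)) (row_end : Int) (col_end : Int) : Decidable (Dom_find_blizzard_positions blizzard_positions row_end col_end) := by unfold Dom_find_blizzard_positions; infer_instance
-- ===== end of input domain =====

-- B interchanges A's loops (per-blizzard outer, per-tick inner, direction dispatch hoisted out of the inner loop).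
-- Both Pythons mutate blizzard_positions in place identically; the equivalence proved here is about the return value.

-- ===== PORT A =====
-- loop body of A's inner loop (the branch chain), kept as a named helper
def pvStepA (row_end col_end : Int) (rcd : Int × Int × String) : Int × Int × String :=
  let row := rcd.1
  let col := rcd.2.1
  let direction := rcd.2.2
  if direction == ">" then
    let col := col + 1
    let col := if col > col_end then 1 else col
    (row, col, direction)
  else if direction == "<" then
    let col := col - 1
    let col := if col < 1 then col_end else col
    (row, col, direction)
  else if direction == "^" then
    let row := row - 1
    let row := if row < 1 then row_end else row
    (row, col, direction)
  else if direction == "v" then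
    let row := row + 1
    let row := if row > row_end then 1 else row
    (row, col, direction)
  else (row, col, direction)

def find_blizzard_positions (blizzard_positions : List (Int × Int × String)) (row_end : Int) (col_end : Int) : List (Int × List (Int × Int)) :=
  let st := (PySem.List.pyRange 0 (col_end * row_end * 3) 1).foldl
    (fun (st : PySem.Dict Int (PySem.Set (Int × Int)) × List (Int × Int × String)) time =>
      let inner := (PySem.List.pyRange 0 ((st.2.length : Int)) 1).foldl
        (fun (st2 : List (Int × Int × String) × PySem.Set (Int × Int)) i =>
          let p := pvStepA row_end col_end (PySem.List.pyGetD st2.1 i (0, 0, ""))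
          (st2.1.set i.toNat p, PySem.Set.add st2.2 (p.1, p.2.1)))
        (st.2, PySem.Set.empty)
      (PySem.Dict.insert st.1 time inner.2, inner.1))
    (PySem.Dict.empty, blizzard_positions)
  st.1.items

-- ===== PORT B =====
-- the four specialized inner loops of B ('col = 1 if col + 1 > col_end else col + 1; occupied_at[t].add(...)', etc.)
def pvRunGT (col_end row : Int) : Int → List (PySem.Set (Int × Int)) → List (PySem.Set (Int × Int))
  | _, [] => []
  | col, b :: bs =>
      let col := if col + 1 > col_end then 1 else col + 1
      PySem.Set.add b (row, col) :: pvRunGT col_end row col bs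

def pvRunLT (col_end row : Int) : Int → List (PySem.Set (Int × Int)) → List (PySem.Set (Int × Int))
  | _, [] => []
  | col, b :: bs =>
      let col := if col - 1 < 1 then col_end else col - 1
      PySem.Set.add b (row, col) :: pvRunLT col_end row col bs

def pvRunUP (row_end col : Int) : Int → List (PySem.Set (Int × Int)) → List (PySem.Set (Int × Int))
  | _, [] => []
  | row, b :: bs =>
      let row := if row - 1 < 1 then row_end else row - 1
      PySem.Set.add b (row, col) :: pvRunUP row_end col row bs

def pvRunDN (row_end col : Int) : Int → List (PySem.Set (Int × Int)) → List (PySem.Set (Int × Int))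
  | _, [] => []
  | row, b :: bs =>
      let row := if row + 1 > row_end then 1 else row + 1
      PySem.Set.add b (row, col) :: pvRunDN row_end col row bs

def pvRunID (pos : Int × Int) (bs : List (PySem.Set (Int × Int))) : List (PySem.Set (Int × Int)) :=
  bs.map (fun b => PySem.Set.add b pos)

def find_blizzard_positions_alt (blizzard_positions : List (Int × Int × String)) (row_end : Int) (col_end : Int) : List (Int × List (Int × Int)) :=
  let total := col_end * row_end * 3
  let occupied_at := blizzard_positions.foldl
    (fun (bs : List (PySem.Set (Int × Int))) p =>
      let row := p.1
      let col := p.2.1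
      let direction := p.2.2
      if direction == ">" then pvRunGT col_end row col bs
      else if direction == "<" then pvRunLT col_end row col bs
      else if direction == "^" then pvRunUP row_end col row bs
      else if direction == "v" then pvRunDN row_end col row bs
      else pvRunID (row, col) bs)
    ((PySem.List.pyRange 0 total 1).map (fun _ => (PySem.Set.empty : PySem.Set (Int × Int))))
  PySem.List.enumerate occupied_at 0

-- ===== PRECONDITION & SPEC =====
def Spec_find_blizzard_positions (blizzard_positions : List (Int × Int × String)) (row_end : Int) (col_end : Int) (out : List (Int × List (Int × Int))) : Prop := out = find_blizzard_positions_alt blizzard_positions row_end col_end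
instance (blizzard_positions : List (Int × Int × String)) (row_end : Int) (col_end : Int) (out : List (Int × List (Int × Int))) : Decidable (Spec_find_blizzard_positions blizzard_positions row_end col_end out) := by unfold Spec_find_blizzard_positions; infer_instance

-- ===== CLAIM (what is proved, stated in full; the proofs are below) =====
def Claim_equal_find_blizzard_positions : Prop := ∀ (blizzard_positions : List (Int × Int × String)) (row_end : Int) (col_end : Int), Dom_find_blizzard_positions blizzard_positions row_end col_end → Spec_find_blizzard_positions blizzard_positions row_end col_end (find_blizzard_positions blizzard_positions row_end col_end)

-- ===== LEMMAS AND PROOFS =====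

-- the occupied set at (0-based) tick t: every blizzard advanced t+1 steps, first-occurrence order
def pvSetAt (row_end col_end : Int) (bp : List (Int × Int × String)) (t : Nat) : PySem.Set (Int × Int) :=
  bp.foldl (fun s p =>
    PySem.Set.add s (((pvStepA row_end col_end)^[t + 1] p).1, ((pvStepA row_end col_end)^[t + 1] p).2.1)) []

-- coordinate step functions of the four directions
def pvGT (ce c : Int) : Int := if c + 1 > ce then 1 else c + 1
def pvLT (ce c : Int) : Int := if c - 1 < 1 then ce else c - 1
def pvUP (re r : Int) : Int := if r - 1 < 1 then re else r - 1
def pvDN (re r : Int) : Int := if r + 1 > re then 1 else r + 1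

-- ===== A-side =====

lemma pv_inner_eq (re ce : Int) : ∀ (xs done : List (Int × Int × String)) (occ : PySem.Set (Int × Int)),
    (PySem.List.pyRange ((done.length : Nat) : Int) (((done.length + xs.length : Nat) : Int)) 1).foldl
      (fun (st2 : List (Int × Int × String) × PySem.Set (Int × Int)) i =>
        let p := pvStepA re ce (PySem.List.pyGetD st2.1 i (0, 0, ""))
        (st2.1.set i.toNat p, PySem.Set.add st2.2 (p.1, p.2.1)))
      (done ++ xs, occ)
    = (done ++ xs.map (pvStepA re ce),
       xs.foldl (fun s p => PySem.Set.add s ((pvStepA re ce p).1, (pvStepA re ce p).2.1)) occ) := by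
  intro xs
  induction xs with
  | nil =>
      intro done occ
      rw [PySem.List.pyRange_one_eq_nil (by simp)]
      simp
  | cons x xs ih =>
      intro done occ
      have hlt : ((done.length : Nat) : Int) < (((done.length + (x :: xs).length : Nat)) : Int) := by
        exact_mod_cast (by simp : done.length < done.length + (x :: xs).length)
      rw [PySem.List.pyRange_one_cons hlt, List.foldl_cons]
      have hget : PySem.List.pyGetD (done ++ x :: xs) ((done.length : Nat) : Int) (0, 0, "") = x := by
        rw [PySem.List.pyGetD_of_nonneg _ _ (Int.natCast_nonneg _)]
        simp [List.getD_eq_getElem?_getD]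
      have hset : ∀ p, (done ++ x :: xs).set ((done.length : Int)).toNat p = (done ++ [p]) ++ xs := by
        intro p
        rw [Int.toNat_natCast, List.set_append]
        simp
      simp only [hget, hset]
      have harr : ((done ++ [pvStepA re ce x]).length : Int) = ((done.length : Nat) : Int) + 1 := by
        simp
      have hbnd : (((done.length + (x :: xs).length : Nat)) : Int)
          = (((done ++ [pvStepA re ce x]).length + xs.length : Nat) : Int) := by
        simp; omega
      rw [hbnd, ← harr, ih (done ++ [pvStepA re ce x]) (PySem.Set.add occ ((pvStepA re ce x).1, (pvStepA re ce x).2.1))]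
      simp

lemma pv_outer_eq (re ce : Int) (bp : List (Int × Int × String)) : ∀ (n : Nat),
    ((List.range n).map (fun k => ((k : Nat) : Int))).foldl
      (fun (st : PySem.Dict Int (PySem.Set (Int × Int)) × List (Int × Int × String)) time =>
        let inner := (PySem.List.pyRange 0 ((st.2.length : Int)) 1).foldl
          (fun (st2 : List (Int × Int × String) × PySem.Set (Int × Int)) i =>
            let p := pvStepA re ce (PySem.List.pyGetD st2.1 i (0, 0, ""))
            (st2.1.set i.toNat p, PySem.Set.add st2.2 (p.1, p.2.1)))
          (st.2, PySem.Set.empty)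
        (PySem.Dict.insert st.1 time inner.2, inner.1))
      (PySem.Dict.empty, bp)
    = (PySem.Dict.mk ((List.range n).map (fun (t : Nat) => ((t : Int), pvSetAt re ce bp t))),
       bp.map ((pvStepA re ce)^[n])) := by
  intro n
  induction n with
  | zero => simp [PySem.Dict.empty]
  | succ n ih =>
      rw [List.range_succ, List.map_append, List.foldl_append, ih]
      have hinner := pv_inner_eq re ce (bp.map ((pvStepA re ce)^[n])) [] PySem.Set.empty
      simp only [List.nil_append, List.length_nil, Nat.cast_zero, Nat.zero_add] at hinner
      simp only [List.map_cons, List.map_nil, List.foldl_cons, List.foldl_nil]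
      rw [hinner]
      dsimp only
      rw [Prod.mk.injEq]
      refine ⟨?_, ?_⟩
      · -- dict component
        apply PySem.Dict.ext
        have hfresh : (PySem.Dict.mk ((List.range n).map (fun (t : Nat) => ((t : Int), pvSetAt re ce bp t)))).contains ((n : Nat) : Int) = false := by
          simp [PySem.Dict.contains_mk, List.any_eq, List.mem_map, List.mem_range]
        rw [PySem.Dict.items_insert_of_not_contains _ _ hfresh]
        have hocc : List.foldl (fun s p => PySem.Set.add s ((pvStepA re ce p).1, (pvStepA re ce p).2.1))
            PySem.Set.empty (bp.map ((pvStepA re ce)^[n])) = pvSetAt re ce bp n := by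
          rw [List.foldl_map]
          simp only [pvSetAt]
          congr 1
          funext s p
          rw [Function.iterate_succ_apply']
        simp only [hocc, List.map_append, List.map_cons, List.map_nil]
      · -- blizzard list component
        rw [List.map_map]
        congr 1
        funext p
        exact (Function.iterate_succ_apply' (pvStepA re ce) n p).symm

lemma pv_A_eq (bp : List (Int × Int × String)) (re ce : Int) :
    find_blizzard_positions bp re ce
    = (List.range (ce * re * 3).toNat).map (fun (t : Nat) => ((t : Int), pvSetAt re ce bp t)) := by
  unfold find_blizzard_positions
  rw [PySem.List.pyRange_one 0 (ce * re * 3)]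
  simp only [Int.sub_zero, zero_add]
  rw [pv_outer_eq re ce bp (ce * re * 3).toNat]

-- ===== B-side =====

lemma pv_stepA_gt (re ce row col : Int) : pvStepA re ce (row, col, ">") = (row, pvGT ce col, ">") := by
  simp [pvStepA, pvGT]
lemma pv_stepA_lt (re ce row col : Int) : pvStepA re ce (row, col, "<") = (row, pvLT ce col, "<") := by
  simp [pvStepA, pvLT]
lemma pv_stepA_up (re ce row col : Int) : pvStepA re ce (row, col, "^") = (pvUP re row, col, "^") := by
  simp [pvStepA, pvUP]
lemma pv_stepA_dn (re ce row col : Int) : pvStepA re ce (row, col, "v") = (pvDN re row, col, "v") := by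
  simp [pvStepA, pvDN]
lemma pv_stepA_id (re ce row col : Int) (d : String)
    (h1 : (d == ">") = false) (h2 : (d == "<") = false) (h3 : (d == "^") = false)
    (h4 : (d == "v") = false) : pvStepA re ce (row, col, d) = (row, col, d) := by
  simp [pvStepA, h1, h2, h3, h4]

lemma pv_iter_gt (re ce row : Int) : ∀ (k : Nat) (col : Int),
    (pvStepA re ce)^[k] (row, col, ">") = (row, (pvGT ce)^[k] col, ">") := by
  intro k
  induction k with
  | zero => intro col; simp
  | succ k ih =>
      intro col
      rw [Function.iterate_succ_apply, Function.iterate_succ_apply, pv_stepA_gt, ih]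
lemma pv_iter_lt (re ce row : Int) : ∀ (k : Nat) (col : Int),
    (pvStepA re ce)^[k] (row, col, "<") = (row, (pvLT ce)^[k] col, "<") := by
  intro k
  induction k with
  | zero => intro col; simp
  | succ k ih =>
      intro col
      rw [Function.iterate_succ_apply, Function.iterate_succ_apply, pv_stepA_lt, ih]
lemma pv_iter_up (re ce col : Int) : ∀ (k : Nat) (row : Int),
    (pvStepA re ce)^[k] (row, col, "^") = ((pvUP re)^[k] row, col, "^") := by
  intro k
  induction k with
  | zero => intro row; simp
  | succ k ih =>
      intro row
      rw [Function.iterate_succ_apply, Function.iterate_succ_apply, pv_stepA_up, ih]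
lemma pv_iter_dn (re ce col : Int) : ∀ (k : Nat) (row : Int),
    (pvStepA re ce)^[k] (row, col, "v") = ((pvDN re)^[k] row, col, "v") := by
  intro k
  induction k with
  | zero => intro row; simp
  | succ k ih =>
      intro row
      rw [Function.iterate_succ_apply, Function.iterate_succ_apply, pv_stepA_dn, ih]

lemma pv_runGT_getElem? (ce row : Int) : ∀ (bs : List (PySem.Set (Int × Int))) (col : Int) (k : Nat),
    (pvRunGT ce row col bs)[k]? = bs[k]?.map (fun b => PySem.Set.add b (row, (pvGT ce)^[k + 1] col)) := by
  intro bs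
  induction bs with
  | nil => intro col k; simp [pvRunGT]
  | cons b bs ih =>
      intro col k
      cases k with
      | zero => simp [pvRunGT, pvGT]
      | succ k =>
          rw [show pvRunGT ce row col (b :: bs) = PySem.Set.add b (row, pvGT ce col) :: pvRunGT ce row (pvGT ce col) bs from rfl]
          rw [List.getElem?_cons_succ, ih, ← Function.iterate_succ_apply]
          simp
lemma pv_runLT_getElem? (ce row : Int) : ∀ (bs : List (PySem.Set (Int × Int))) (col : Int) (k : Nat),
    (pvRunLT ce row col bs)[k]? = bs[k]?.map (fun b => PySem.Set.add b (row, (pvLT ce)^[k + 1] col)) := by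
  intro bs
  induction bs with
  | nil => intro col k; simp [pvRunLT]
  | cons b bs ih =>
      intro col k
      cases k with
      | zero => simp [pvRunLT, pvLT]
      | succ k =>
          rw [show pvRunLT ce row col (b :: bs) = PySem.Set.add b (row, pvLT ce col) :: pvRunLT ce row (pvLT ce col) bs from rfl]
          rw [List.getElem?_cons_succ, ih, ← Function.iterate_succ_apply]
          simp
lemma pv_runUP_getElem? (re col : Int) : ∀ (bs : List (PySem.Set (Int × Int))) (row : Int) (k : Nat),
    (pvRunUP re col row bs)[k]? = bs[k]?.map (fun b => PySem.Set.add b ((pvUP re)^[k + 1] row, col)) := by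
  intro bs
  induction bs with
  | nil => intro row k; simp [pvRunUP]
  | cons b bs ih =>
      intro row k
      cases k with
      | zero => simp [pvRunUP, pvUP]
      | succ k =>
          rw [show pvRunUP re col row (b :: bs) = PySem.Set.add b (pvUP re row, col) :: pvRunUP re col (pvUP re row) bs from rfl]
          rw [List.getElem?_cons_succ, ih, ← Function.iterate_succ_apply]
          simp
lemma pv_runDN_getElem? (re col : Int) : ∀ (bs : List (PySem.Set (Int × Int))) (row : Int) (k : Nat),
    (pvRunDN re col row bs)[k]? = bs[k]?.map (fun b => PySem.Set.add b ((pvDN re)^[k + 1] row, col)) := by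
  intro bs
  induction bs with
  | nil => intro row k; simp [pvRunDN]
  | cons b bs ih =>
      intro row k
      cases k with
      | zero => simp [pvRunDN, pvDN]
      | succ k =>
          rw [show pvRunDN re col row (b :: bs) = PySem.Set.add b (pvDN re row, col) :: pvRunDN re col (pvDN re row) bs from rfl]
          rw [List.getElem?_cons_succ, ih, ← Function.iterate_succ_apply]
          simp

lemma pv_runGT_length (ce row : Int) : ∀ (bs : List (PySem.Set (Int × Int))) (col : Int),
    (pvRunGT ce row col bs).length = bs.length := by
  intro bs; induction bs with
  | nil => intro col; simp [pvRunGT]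
  | cons b bs ih => intro col; simp [pvRunGT, ih]
lemma pv_runLT_length (ce row : Int) : ∀ (bs : List (PySem.Set (Int × Int))) (col : Int),
    (pvRunLT ce row col bs).length = bs.length := by
  intro bs; induction bs with
  | nil => intro col; simp [pvRunLT]
  | cons b bs ih => intro col; simp [pvRunLT, ih]
lemma pv_runUP_length (re col : Int) : ∀ (bs : List (PySem.Set (Int × Int))) (row : Int),
    (pvRunUP re col row bs).length = bs.length := by
  intro bs; induction bs with
  | nil => intro row; simp [pvRunUP]
  | cons b bs ih => intro row; simp [pvRunUP, ih]
lemma pv_runDN_length (re col : Int) : ∀ (bs : List (PySem.Set (Int × Int))) (row : Int),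
    (pvRunDN re col row bs).length = bs.length := by
  intro bs; induction bs with
  | nil => intro row; simp [pvRunDN]
  | cons b bs ih => intro row; simp [pvRunDN, ih]

-- one blizzard's contribution, pointwise
lemma pv_body_getElem? (re ce : Int) (p : Int × Int × String) (bs : List (PySem.Set (Int × Int))) (k : Nat) :
    ((if p.2.2 == ">" then pvRunGT ce p.1 p.2.1 bs
      else if p.2.2 == "<" then pvRunLT ce p.1 p.2.1 bs
      else if p.2.2 == "^" then pvRunUP re p.2.1 p.1 bs
      else if p.2.2 == "v" then pvRunDN re p.2.1 p.1 bs
      else pvRunID (p.1, p.2.1) bs))[k]?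
    = bs[k]?.map (fun b => PySem.Set.add b (((pvStepA re ce)^[k + 1] p).1, ((pvStepA re ce)^[k + 1] p).2.1)) := by
  obtain ⟨row, col, d⟩ := p
  by_cases h1 : (d == ">") = true
  · rw [if_pos h1, eq_of_beq h1, pv_runGT_getElem?, pv_iter_gt]
  by_cases h2 : (d == "<") = true
  · rw [if_neg (by simp_all), if_pos h2, eq_of_beq h2, pv_runLT_getElem?, pv_iter_lt]
  by_cases h3 : (d == "^") = true
  · rw [if_neg (by simp_all), if_neg (by simp_all), if_pos h3, eq_of_beq h3, pv_runUP_getElem?, pv_iter_up]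
  by_cases h4 : (d == "v") = true
  · rw [if_neg (by simp_all), if_neg (by simp_all), if_neg (by simp_all), if_pos h4, eq_of_beq h4,
        pv_runDN_getElem?, pv_iter_dn]
  · rw [if_neg (by simp_all), if_neg (by simp_all), if_neg (by simp_all), if_neg (by simp_all)]
    have hfix : (pvStepA re ce)^[k + 1] (row, col, d) = (row, col, d) :=
      Function.iterate_fixed (pv_stepA_id re ce row col d (by simp_all) (by simp_all) (by simp_all) (by simp_all)) _
    simp [pvRunID, hfix]

lemma pv_body_length (re ce : Int) (p : Int × Int × String) (bs : List (PySem.Set (Int × Int))) :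
    ((if p.2.2 == ">" then pvRunGT ce p.1 p.2.1 bs
      else if p.2.2 == "<" then pvRunLT ce p.1 p.2.1 bs
      else if p.2.2 == "^" then pvRunUP re p.2.1 p.1 bs
      else if p.2.2 == "v" then pvRunDN re p.2.1 p.1 bs
      else pvRunID (p.1, p.2.1) bs)).length = bs.length := by
  split_ifs <;> simp [pv_runGT_length, pv_runLT_length, pv_runUP_length, pv_runDN_length, pvRunID]

lemma pv_fold_getElem? (re ce : Int) : ∀ (bp : List (Int × Int × String)) (bs : List (PySem.Set (Int × Int))) (k : Nat),
    (bp.foldl (fun bs p =>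
        if p.2.2 == ">" then pvRunGT ce p.1 p.2.1 bs
        else if p.2.2 == "<" then pvRunLT ce p.1 p.2.1 bs
        else if p.2.2 == "^" then pvRunUP re p.2.1 p.1 bs
        else if p.2.2 == "v" then pvRunDN re p.2.1 p.1 bs
        else pvRunID (p.1, p.2.1) bs) bs)[k]?
    = bs[k]?.map (fun b => bp.foldl (fun s p =>
        PySem.Set.add s (((pvStepA re ce)^[k + 1] p).1, ((pvStepA re ce)^[k + 1] p).2.1)) b) := by
  intro bp
  induction bp with
  | nil => intro bs k; simp
  | cons p bp ih =>
      intro bs k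
      rw [List.foldl_cons, ih, pv_body_getElem? re ce p bs k, Option.map_map]
      rfl

lemma pv_fold_length (re ce : Int) : ∀ (bp : List (Int × Int × String)) (bs : List (PySem.Set (Int × Int))),
    (bp.foldl (fun bs p =>
        if p.2.2 == ">" then pvRunGT ce p.1 p.2.1 bs
        else if p.2.2 == "<" then pvRunLT ce p.1 p.2.1 bs
        else if p.2.2 == "^" then pvRunUP re p.2.1 p.1 bs
        else if p.2.2 == "v" then pvRunDN re p.2.1 p.1 bs
        else pvRunID (p.1, p.2.1) bs) bs).length = bs.length := by
  intro bp
  induction bp with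
  | nil => intro bs; rfl
  | cons p bp ih => intro bs; rw [List.foldl_cons, ih, pv_body_length]

lemma pv_B_eq (bp : List (Int × Int × String)) (re ce : Int) :
    find_blizzard_positions_alt bp re ce
    = (List.range (ce * re * 3).toNat).map (fun (t : Nat) => ((t : Int), pvSetAt re ce bp t)) := by
  unfold find_blizzard_positions_alt
  dsimp only
  set bs0 : List (PySem.Set (Int × Int)) :=
    (PySem.List.pyRange 0 (ce * re * 3) 1).map (fun _ => (PySem.Set.empty : PySem.Set (Int × Int))) with hbs0
  set buckets := bp.foldl
    (fun (bs : List (PySem.Set (Int × Int))) p =>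
      if p.2.2 == ">" then pvRunGT ce p.1 p.2.1 bs
      else if p.2.2 == "<" then pvRunLT ce p.1 p.2.1 bs
      else if p.2.2 == "^" then pvRunUP re p.2.1 p.1 bs
      else if p.2.2 == "v" then pvRunDN re p.2.1 p.1 bs
      else pvRunID (p.1, p.2.1) bs) bs0 with hbuck
  have hlen0 : bs0.length = (ce * re * 3).toNat := by
    simp [hbs0, PySem.List.pyRange_one]
  have hlen : buckets.length = (ce * re * 3).toNat := by
    rw [hbuck, pv_fold_length, hlen0]
  have hget : ∀ k : Nat, k < (ce * re * 3).toNat → buckets[k]? = some (pvSetAt re ce bp k) := by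
    intro k hk
    have hk0 : k < bs0.length := by rw [hlen0]; exact hk
    have h0 : bs0[k]? = some PySem.Set.empty := by
      rw [List.getElem?_eq_getElem hk0]
      simp [hbs0]
    rw [hbuck, pv_fold_getElem?, h0]
    rfl
  rw [PySem.List.enumerate_eq_map_pyRange buckets ([] : PySem.Set (Int × Int))]
  have hlenInt : PySem.List.len buckets = ((ce * re * 3).toNat : Int) := by
    simp [PySem.List.len_eq, hlen]
  rw [hlenInt, PySem.List.pyRange_one, List.map_map]
  simp only [Int.sub_zero, Int.toNat_natCast]
  apply List.map_congr_left
  intro k hk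
  have hk' : k < (ce * re * 3).toNat := List.mem_range.mp hk
  simp only [Function.comp_apply, zero_add]
  rw [PySem.List.pyGetD_of_nonneg _ _ (Int.natCast_nonneg k), Int.toNat_natCast,
      List.getD_eq_getElem?_getD, hget k hk']
  rfl

-- ===== VERDICT (by name: the statement is the Claim_ definition above) =====
theorem find_blizzard_positions_spec : Claim_equal_find_blizzard_positions := by
  intro bp re ce _
  unfold Spec_find_blizzard_positions
  rw [pv_A_eq, pv_B_eq]
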